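-- pv_equiv track=rewrite | github.com/CDMY0417/Tool_MATH | function_tools/function_total/paek9a.py | integer_to_binary_exponents
-- ===== SOURCE A (Python) =====
-- def integer_to_binary_exponents(number: int):
--     exponents = []
--     power = 0
--     while number > 0:
--         if number % 2 == 1:
--             exponents.append(power)
--         number = number // 2
--         power += 1
--     return exponents
-- ===== SOURCE B (Python) =====
-- def integer_to_binary_exponents(number: int):
--     if number <= 0:
--         return []
--     s = bin(number)[2:]
--     return [i for i, bit in enumerate(reversed(s)) if bit == '1']
-- ===== Notes on version B (the rewrite author's own statement) =====
-- stated objective: idiomatic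
-- what changed: B builds the binary representation once with bin(number) and returns the indices of '1' characters in a single enumerate scan over the reversed string, instead of A's bit-by-bit divide-by-two loop with a running power counter.
import Mathlib
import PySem

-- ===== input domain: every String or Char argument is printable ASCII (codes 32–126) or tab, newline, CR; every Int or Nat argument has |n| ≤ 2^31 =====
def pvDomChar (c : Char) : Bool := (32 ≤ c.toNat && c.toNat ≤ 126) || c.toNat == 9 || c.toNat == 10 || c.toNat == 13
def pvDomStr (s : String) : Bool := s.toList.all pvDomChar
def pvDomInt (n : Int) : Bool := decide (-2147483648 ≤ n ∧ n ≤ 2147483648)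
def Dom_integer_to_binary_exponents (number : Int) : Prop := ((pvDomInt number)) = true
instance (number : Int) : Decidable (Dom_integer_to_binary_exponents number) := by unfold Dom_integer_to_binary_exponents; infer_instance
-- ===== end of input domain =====

-- B builds the binary digit string once (bin(number)[2:]) and collects the indices of '1'
-- characters in one enumerate scan of the reversed string, instead of A's divide-by-two loop.

-- ===== PORT A =====
-- the while-loop of A, state (number, power, exponents)
def pvALoop (number power : Int) (acc : List Int) : List Int :=
  if 0 < number then
    pvALoop (PySem.Int.floordiv number 2) (power + 1)
      (if PySem.Int.mod number 2 = 1 then acc ++ [power] else acc)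
  else acc
termination_by number.toNat
decreasing_by
  have h2 : PySem.Int.floordiv number 2 = number / 2 :=
    PySem.Int.floordiv_eq_ediv_of_pos (by omega)
  rw [h2]; omega

def integer_to_binary_exponents (number : Int) : List Int :=
  pvALoop number 0 []

-- ===== PORT B =====
-- the digit characters of bin(n)[2:] for n > 0, most significant first (bin(0)[2:] = "0"
-- never arises: B returns early for number <= 0)
def pvBinChars (n : Nat) : List Char :=
  if n = 0 then [] else pvBinChars (n / 2) ++ [if n % 2 = 1 then '1' else '0']

def integer_to_binary_exponents_alt (number : Int) : List Int :=
  if number ≤ 0 then []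
  else
    ((PySem.List.enumerate (pvBinChars number.toNat).reverse 0).filter
        (fun p => p.2 == '1')).map (·.1)

-- ===== PRECONDITION & SPEC =====
def Spec_integer_to_binary_exponents (number : Int) (out : List Int) : Prop := out = integer_to_binary_exponents_alt number
instance (number : Int) (out : List Int) : Decidable (Spec_integer_to_binary_exponents number out) := by unfold Spec_integer_to_binary_exponents; infer_instance

-- ===== CLAIM (what is proved, stated in full; the proofs are below) =====
def Claim_equal_integer_to_binary_exponents : Prop := ∀ (number : Int), Dom_integer_to_binary_exponents number → Spec_integer_to_binary_exponents number (integer_to_binary_exponents number)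

-- ===== LEMMAS AND PROOFS =====

-- canonical list of set-bit exponents of n (least significant first), shifted by +s via map
def pvExps (n : Nat) : List Int :=
  if n = 0 then [] else (if n % 2 = 1 then [(0 : Int)] else []) ++ (pvExps (n / 2)).map (· + 1)

lemma pvALoop_eq (n : Nat) : ∀ (power : Int) (acc : List Int),
    pvALoop (n : Int) power acc = acc ++ (pvExps n).map (· + power) := by
  induction n using Nat.strong_induction_on with
  | _ n ih =>
    intro power acc
    by_cases h0 : n = 0
    · subst h0
      rw [pvALoop, pvExps]
      simp
    · rw [pvALoop, pvExps]
      have hpos : (0 : Int) < (n : Int) := by exact_mod_cast Nat.pos_of_ne_zero h0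
      rw [if_pos hpos, if_neg h0]
      have hfd : PySem.Int.floordiv (n : Int) 2 = ((n / 2 : Nat) : Int) :=
        PySem.Int.floordiv_natCast n 2
      have hmd : PySem.Int.mod (n : Int) 2 = ((n % 2 : Nat) : Int) :=
        PySem.Int.mod_natCast n 2
      rw [hfd, hmd, ih (n / 2) (Nat.div_lt_self (Nat.pos_of_ne_zero h0) (by norm_num))]
      by_cases hpar : n % 2 = 1
      · rw [if_pos (by omega), if_pos hpar]
        simp [List.map_map]
        exact fun a _ => by ring
      · rw [if_neg (by omega), if_neg hpar]
        simp [List.map_map]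
        exact fun a _ => by ring

lemma pvBScan_eq (n : Nat) : ∀ (s : Int),
    ((PySem.List.enumerate (pvBinChars n).reverse s).filter (fun p => p.2 == '1')).map (·.1)
      = (pvExps n).map (· + s) := by
  induction n using Nat.strong_induction_on with
  | _ n ih =>
    intro s
    by_cases h0 : n = 0
    · subst h0
      rw [pvBinChars, pvExps]
      simp [PySem.List.enumerate_nil]
    · rw [pvBinChars, pvExps, if_neg h0, if_neg h0]
      rw [List.reverse_append]
      simp only [List.reverse_singleton, List.singleton_append]
      rw [PySem.List.enumerate_cons, List.filter_cons]
      have hlt : n / 2 < n := Nat.div_lt_self (Nat.pos_of_ne_zero h0) (by norm_num)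
      by_cases hpar : n % 2 = 1
      · rw [if_pos hpar]
        simp only [if_pos hpar]
        rw [if_pos (show (((s, '1')).2 == '1') = true from rfl)]
        simp only [List.map_cons, ih (n / 2) hlt (s + 1)]
        simp [List.map_map]
        exact fun a _ => by ring
      · rw [if_neg hpar]
        simp only [if_neg hpar]
        rw [if_neg (show ¬ ((s, '0').2 == '1') = true from fun hc => by simp at hc)]
        rw [ih (n / 2) hlt (s + 1)]
        simp [List.map_map]
        exact fun a _ => by ring

-- ===== VERDICT (by name: the statement is the Claim_ definition above) =====
theorem integer_to_binary_exponents_spec : Claim_equal_integer_to_binary_exponents := by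
  intro number _
  unfold Spec_integer_to_binary_exponents integer_to_binary_exponents integer_to_binary_exponents_alt
  by_cases h : number ≤ 0
  · rw [if_pos h, pvALoop, if_neg (by omega)]
  · rw [if_neg h]
    have hn : ((number.toNat : Nat) : Int) = number := Int.toNat_of_nonneg (by omega)
    have hA := pvALoop_eq number.toNat 0 []
    rw [hn] at hA
    rw [hA, pvBScan_eq]
    simp
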